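-- pv_equiv track=rewrite | github.com/lidge-jun/cli-jaw-skills | hwp/scripts/hwpx_cli.py | _fix_xml_declaration
-- ===== SOURCE A (Python) =====
-- def _fix_xml_declaration(content: str) -> str:
--     """Fix missing or duplicate XML declarations."""
--     lines = content.split("\n")
--     decl_indices = [i for i, l in enumerate(lines) if l.strip().startswith("<?xml")]
--
--     if not decl_indices:
--         # Missing — add standard declaration
--         return '<?xml version="1.0" encoding="UTF-8"?>\n' + content
--     elif len(decl_indices) > 1:
--         # Duplicate — keep first only
--         for idx in reversed(decl_indices[1:]):
--             lines.pop(idx)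
--         return "\n".join(lines)
--     return content
-- ===== SOURCE B (Python) =====
-- def _fix_xml_declaration(content: str) -> str:
--     """Fix missing or duplicate XML declarations (single pass with a seen flag)."""
--     seen = False
--     result = []
--     for l in content.split("\n"):
--         if l.strip().startswith("<?xml"):
--             if seen:
--                 continue
--             seen = True
--         result.append(l)
--     if not seen:
--         return '<?xml version="1.0" encoding="UTF-8"?>\n' + content
--     return "\n".join(result)
-- ===== Notes on version B (the rewrite author's own statement) =====
-- stated objective: simpler
-- what changed: Replaces A's index comprehension plus reversed-index pop loop with one forward pass that keeps a seen flag and builds the output list directly, skipping duplicate declaration lines.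
import Mathlib
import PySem

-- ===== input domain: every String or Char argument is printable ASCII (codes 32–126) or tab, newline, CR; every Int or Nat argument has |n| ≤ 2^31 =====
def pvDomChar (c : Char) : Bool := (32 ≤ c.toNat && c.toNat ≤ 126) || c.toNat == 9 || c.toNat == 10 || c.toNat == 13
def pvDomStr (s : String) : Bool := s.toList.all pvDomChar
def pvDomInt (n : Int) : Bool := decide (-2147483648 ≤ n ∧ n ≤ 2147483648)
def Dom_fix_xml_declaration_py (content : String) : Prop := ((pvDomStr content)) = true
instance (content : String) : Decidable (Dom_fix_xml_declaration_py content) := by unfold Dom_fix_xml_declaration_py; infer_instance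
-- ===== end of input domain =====

-- B replaces A's index-comprehension + reversed-index pop loop by one forward pass with a
-- seen flag that builds the output list directly (objective: simpler).

-- ===== PORT A =====
-- shared test: l.strip().startswith("<?xml")
def pvIsDecl (l : String) : Bool := PySem.Str.startswith (PySem.Str.strip l) "<?xml"

-- lines.pop(idx); the index is always in range here, the `none` branch is unreachable
def pvPopAt (ls : List String) (idx : Int) : List String :=
  match PySem.List.pop? ls idx with
  | some (_, ls') => ls'
  | none => ls

def fix_xml_declaration_py (content : String) : String :=
  let lines := (PySem.Str.split? content "\n").getD []   -- sep "\n" is nonempty: never none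
  let declIndices : List Int :=
    (PySem.List.enumerate lines).filterMap (fun il => if pvIsDecl il.2 then some il.1 else none)
  if declIndices.isEmpty then
    "<?xml version=\"1.0\" encoding=\"UTF-8\"?>\n" ++ content
  else if 1 < declIndices.length then
    PySem.Str.join "\n" (((declIndices.drop 1).reverse).foldl pvPopAt lines)
  else content

-- ===== PORT B =====
-- loop state: (seen, result); result is appended at the back as in the Python
def pvStep (st : Bool × List String) (l : String) : Bool × List String :=
  if pvIsDecl l then
    if st.1 then st
    else (true, st.2 ++ [l])
  else (st.1, st.2 ++ [l])

def fix_xml_declaration_py_alt (content : String) : String :=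
  let st := ((PySem.Str.split? content "\n").getD []).foldl pvStep (false, [])
  if st.1 = false then "<?xml version=\"1.0\" encoding=\"UTF-8\"?>\n" ++ content
  else PySem.Str.join "\n" st.2

-- ===== PRECONDITION & SPEC =====
def Spec_fix_xml_declaration_py (content : String) (out : String) : Prop := out = fix_xml_declaration_py_alt content
instance (content : String) (out : String) : Decidable (Spec_fix_xml_declaration_py content out) := by unfold Spec_fix_xml_declaration_py; infer_instance

-- ===== CLAIM (what is proved, stated in full; the proofs are below) =====
def Claim_equal_fix_xml_declaration_py : Prop := ∀ (content : String), Dom_fix_xml_declaration_py content → Spec_fix_xml_declaration_py content (fix_xml_declaration_py content)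

-- ===== LEMMAS AND PROOFS =====

-- the decl indices of `ls` when numbering starts at `s`
def pvIdxs (ls : List String) (s : Int) : List Int :=
  (PySem.List.enumerate ls s).filterMap (fun il => if pvIsDecl il.2 then some il.1 else none)

-- "keep the first decl line, drop later ones" as a recursion (B's loop computes this)
def pvKeepFirst : List String → List String
  | [] => []
  | l :: ls => if pvIsDecl l then l :: ls.filter (fun x => !pvIsDecl x) else l :: pvKeepFirst ls

theorem pvIdxs_nil (s : Int) : pvIdxs [] s = [] := rfl

theorem pvIdxs_cons (l : String) (ls : List String) (s : Int) :
    pvIdxs (l :: ls) s = if pvIsDecl l then s :: pvIdxs ls (s + 1) else pvIdxs ls (s + 1) := by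
  simp only [pvIdxs, PySem.List.enumerate_cons, List.filterMap_cons]
  split <;> simp_all

theorem pvIdxs_shift (ls : List String) (s : Int) :
    pvIdxs ls (s + 1) = (pvIdxs ls s).map (· + 1) := by
  induction ls generalizing s with
  | nil => rfl
  | cons l ls ih => simp [pvIdxs_cons, ih (s+1), ih s]; split <;> simp

theorem pvIdxs_pos (ls : List String) (s : Int) : ∀ n ∈ pvIdxs ls s, s ≤ n := by
  induction ls generalizing s with
  | nil => simp [pvIdxs_nil]
  | cons l ls ih =>
    intro n hn
    rw [pvIdxs_cons] at hn
    split at hn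
    · rcases List.mem_cons.1 hn with h | h
      · omega
      · have := ih (s+1) n h; omega
    · have := ih (s+1) n hn; omega

theorem pvPopAt_zero (x : String) (xs : List String) : pvPopAt (x :: xs) 0 = xs := by
  simp [pvPopAt, PySem.List.pop?, PySem.List.pyIdx?]

theorem pvPopAt_succ (x : String) (xs : List String) (i : Int) (h : 0 ≤ i) :
    pvPopAt (x :: xs) (i + 1) = x :: pvPopAt xs i := by
  unfold pvPopAt PySem.List.pop? PySem.List.pyIdx?
  by_cases hlt : i < (xs.length : Int)
  · have h1 : (0:Int) ≤ i + 1 := by omega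
    have h2 : i + 1 < (xs.length : Int) + 1 := by omega
    simp only [List.length_cons]
    rw [if_pos h1, if_pos (by push_cast; omega), if_pos h, if_pos hlt]
    have hkn : (i + 1).toNat = i.toNat + 1 := by omega
    rw [hkn]
    simp only [Option.bind_some]
    have hik : i.toNat < xs.length := by omega
    simp [hik, List.eraseIdx_cons_succ]
  · have : ¬ (i + 1 < ((x :: xs).length : Int)) := by simp; omega
    rw [if_pos (by omega), if_neg this, if_pos h, if_neg hlt]
    simp

-- folding pops over a list of shifted (+1) nonnegative indices skips the head
theorem pvFold_map_succ (ns : List Int) (h : ∀ n ∈ ns, 0 ≤ n) :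
    ∀ (x : String) (xs : List String),
      (ns.map (· + 1)).foldl pvPopAt (x :: xs) = x :: ns.foldl pvPopAt xs := by
  induction ns with
  | nil => intro x xs; rfl
  | cons n ns ih =>
    intro x xs
    have hn : 0 ≤ n := h n (by simp)
    simp only [List.map_cons, List.foldl_cons, pvPopAt_succ x xs n hn]
    exact ih (fun m hm => h m (by simp [hm])) x _

-- popping ALL decl indices (in reverse) filters out every decl line
theorem pvFold_all (ls : List String) :
    ((pvIdxs ls 0).reverse).foldl pvPopAt ls = ls.filter (fun x => !pvIsDecl x) := by
  induction ls with
  | nil => rfl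
  | cons x xs ih =>
    rw [pvIdxs_cons]
    have hpos : ∀ n ∈ (pvIdxs xs 0).map (· + 1), 0 ≤ n := by
      intro n hn
      rcases List.mem_map.1 hn with ⟨m, hm, rfl⟩
      have := pvIdxs_pos xs 0 m hm; omega
    by_cases hx : pvIsDecl x
    · rw [if_pos hx]
      have : (((0:Int) :: pvIdxs xs (0+1)).reverse) = (pvIdxs xs (0+1)).reverse ++ [0] := by simp
      rw [this, List.foldl_append]
      rw [pvIdxs_shift, ← List.map_reverse]
      have hpos' : ∀ n ∈ (pvIdxs xs 0).reverse, 0 ≤ n := by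
        intro n hn; exact pvIdxs_pos xs 0 n (List.mem_reverse.1 hn)
      rw [pvFold_map_succ _ hpos' x xs]
      simp [pvPopAt_zero, ih, hx]
    · rw [if_neg hx, pvIdxs_shift, ← List.map_reverse]
      have hpos' : ∀ n ∈ (pvIdxs xs 0).reverse, 0 ≤ n := by
        intro n hn; exact pvIdxs_pos xs 0 n (List.mem_reverse.1 hn)
      rw [pvFold_map_succ _ hpos' x xs, ih]
      simp [hx]

-- popping all decl indices but the first (in reverse) computes pvKeepFirst
theorem pvFold_tail (ls : List String) :
    (((pvIdxs ls 0).drop 1).reverse).foldl pvPopAt ls = pvKeepFirst ls := by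
  induction ls with
  | nil => rfl
  | cons x xs ih =>
    rw [pvIdxs_cons]
    by_cases hx : pvIsDecl x
    · rw [if_pos hx]
      simp only [List.drop_one, List.tail_cons]
      rw [pvIdxs_shift, ← List.map_reverse]
      have hpos : ∀ n ∈ (pvIdxs xs 0).reverse, 0 ≤ n := by
        intro n hn; exact pvIdxs_pos xs 0 n (List.mem_reverse.1 hn)
      rw [pvFold_map_succ _ hpos x xs, pvFold_all]
      simp [pvKeepFirst, hx]
    · rw [if_neg hx, pvIdxs_shift]
      have hdrop : ((pvIdxs xs 0).map (· + 1)).drop 1 = ((pvIdxs xs 0).drop 1).map (· + 1) := by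
        exact (List.map_drop ..).symm
      rw [hdrop, ← List.map_reverse]
      have hpos : ∀ n ∈ ((pvIdxs xs 0).drop 1).reverse, 0 ≤ n := by
        intro n hn
        exact pvIdxs_pos xs 0 n (List.mem_of_mem_drop (List.mem_reverse.1 hn))
      rw [pvFold_map_succ _ hpos x xs, ih]
      simp [pvKeepFirst, hx]

-- B's fold, after the flag is set, just filters out decl lines
theorem pvFoldl_step_true (ls : List String) :
    ∀ acc, ls.foldl pvStep (true, acc) = (true, acc ++ ls.filter (fun x => !pvIsDecl x)) := by
  induction ls with
  | nil => intro acc; simp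
  | cons x xs ih =>
    intro acc
    by_cases hx : pvIsDecl x
    · simp [pvStep, hx, ih acc]
    · simp [pvStep, hx, ih (acc ++ [x])]

-- B's fold from the unset flag: flag = any decl line, list = pvKeepFirst
theorem pvFoldl_step_false (ls : List String) :
    ∀ acc, ls.foldl pvStep (false, acc) = (ls.any pvIsDecl, acc ++ pvKeepFirst ls) := by
  induction ls with
  | nil => intro acc; simp [pvKeepFirst]
  | cons x xs ih =>
    intro acc
    by_cases hx : pvIsDecl x
    · simp [pvStep, hx, pvFoldl_step_true, pvKeepFirst]
    · simp [pvStep, hx, ih (acc ++ [x]), pvKeepFirst]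

theorem pvIdxs_length (ls : List String) (s : Int) :
    (pvIdxs ls s).length = (ls.filter pvIsDecl).length := by
  induction ls generalizing s with
  | nil => rfl
  | cons l ls ih =>
    rw [pvIdxs_cons]
    by_cases hl : pvIsDecl l <;> simp [hl, ih (s+1)]

-- exactly one decl line: pvKeepFirst is the identity
theorem pvKeepFirst_single (ls : List String) (h : (ls.filter pvIsDecl).length ≤ 1) :
    pvKeepFirst ls = ls := by
  induction ls with
  | nil => rfl
  | cons x xs ih =>
    by_cases hx : pvIsDecl x
    · simp [hx] at h
      have : xs.filter (fun l => !pvIsDecl l) = xs := by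
        rw [List.filter_eq_self]; intro a ha; simp [h a ha]
      simp [pvKeepFirst, hx, this]
    · have : (xs.filter pvIsDecl).length ≤ 1 := by simpa [List.filter_cons, hx] using h
      simp [pvKeepFirst, hx, ih this]

-- ===== split/join roundtrip =====

-- a clean accumulator version of PySem.Chars.splitOn.go for a one-char separator
def pvSplit (c : Char) : List Char → List Char → List (List Char)
  | [], cur => [cur.reverse]
  | x :: rest, cur => if x = c then cur.reverse :: pvSplit c rest [] else pvSplit c rest (x :: cur)

theorem pvSplit_ne_nil (c : Char) (l cur : List Char) : pvSplit c l cur ≠ [] := by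
  induction l generalizing cur with
  | nil => simp [pvSplit]
  | cons x rest ih =>
    by_cases hx : x = c <;> simp [pvSplit, hx, ih]

theorem pvGo_eq (c : Char) (fuel : Nat) :
    ∀ (l cur : List Char) (acc : List (List Char)), l.length < fuel →
      PySem.Chars.splitOn.go [c] fuel l cur acc = acc.reverse ++ pvSplit c l cur := by
  induction fuel with
  | zero => intro l cur acc h; omega
  | succ fuel ih =>
    intro l cur acc h
    cases l with
    | nil => simp [PySem.Chars.splitOn.go, pvSplit]
    | cons x rest =>
      by_cases hx : x = c
      · have hpre : [c].isPrefixOf (x :: rest) = true := by simp [List.isPrefixOf, hx]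
        rw [PySem.Chars.splitOn.go, if_pos hpre]
        simp only [List.length_cons] at h
        rw [ih _ _ _ (by simpa using Nat.lt_of_succ_lt_succ h)]
        simp [pvSplit, hx]
      · have hpre : [c].isPrefixOf (x :: rest) = false := by
          simp [List.isPrefixOf]
          exact fun hc => hx hc.symm
        rw [PySem.Chars.splitOn.go, if_neg (by simp [hpre])]
        simp only [List.length_cons] at h
        rw [ih _ _ _ (Nat.lt_of_succ_lt_succ h)]
        simp [pvSplit, hx]

theorem pvJoin_pvSplit (c : Char) (l : List Char) :
    ∀ cur, PySem.Chars.join [c] (pvSplit c l cur) = cur.reverse ++ l := by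
  induction l with
  | nil => intro cur; simp [pvSplit, PySem.Chars.join, List.intercalate]
  | cons x rest ih =>
    intro cur
    by_cases hx : x = c
    · rw [pvSplit, if_pos hx]
      rcases hrest : pvSplit c rest [] with _ | ⟨b, t⟩
      · exact absurd hrest (pvSplit_ne_nil c rest [])
      · have := ih []
        rw [hrest] at this
        simp only [List.reverse_nil, List.nil_append] at this
        simp [PySem.Chars.join, List.intercalate, List.intersperse] at this ⊢
        simp [this, hx]
    · rw [pvSplit, if_neg hx, ih (x :: cur)]
      simp

theorem pvJoin_splitOn (c : Char) (cs : List Char) :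
    PySem.Chars.join [c] (PySem.Chars.splitOn cs [c]) = cs := by
  unfold PySem.Chars.splitOn
  rw [pvGo_eq c (cs.length + 1) cs [] [] (by omega)]
  simpa using pvJoin_pvSplit c cs []

theorem pvJoin_split (content : String) :
    PySem.Str.join "\n" ((PySem.Str.split? content "\n").getD []) = content := by
  have hsep : ("\n" : String).toList = ['\n'] := by decide
  unfold PySem.Str.split? PySem.Chars.split?
  rw [hsep]
  simp only [List.isEmpty_cons, Bool.false_eq_true, if_false, Option.map_some, Option.getD_some]
  unfold PySem.Str.join
  rw [hsep, List.map_map]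
  have : (String.toList ∘ String.ofList) = id := by
    funext l; simp [String.toList_ofList]
  rw [this, List.map_id, pvJoin_splitOn]
  exact String.ofList_toList

-- countP / any / emptiness bridges
theorem pvIdxs_empty_iff (ls : List String) :
    (pvIdxs ls 0).isEmpty = true ↔ ls.any pvIsDecl = false := by
  rw [List.isEmpty_iff, ← List.length_eq_zero_iff, pvIdxs_length]
  simp [List.length_eq_zero_iff, List.filter_eq_nil_iff, List.any_eq_false]

-- ===== VERDICT (by name: the statement is the Claim_ definition above) =====
theorem fix_xml_declaration_py_spec : Claim_equal_fix_xml_declaration_py := by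
  unfold Claim_equal_fix_xml_declaration_py
  intro content _
  unfold Spec_fix_xml_declaration_py fix_xml_declaration_py fix_xml_declaration_py_alt
  simp only []
  set lines := (PySem.Str.split? content "\n").getD [] with hlines
  have hfold := pvFoldl_step_false lines []
  rw [List.nil_append] at hfold
  have hdecl : (PySem.List.enumerate lines).filterMap
      (fun il => if pvIsDecl il.2 then some il.1 else none) = pvIdxs lines 0 := rfl
  rw [hdecl, hfold]
  by_cases hempty : (pvIdxs lines 0).isEmpty
  · have hany : lines.any pvIsDecl = false := (pvIdxs_empty_iff lines).1 hempty
    rw [if_pos hempty]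
    simp [hany]
  · have hany : lines.any pvIsDecl = true := by
      rcases h : lines.any pvIsDecl with _ | _
      · exact absurd ((pvIdxs_empty_iff lines).2 h) hempty
      · rfl
    rw [if_neg hempty]
    simp only [hany]
    by_cases hlen : 1 < (pvIdxs lines 0).length
    · rw [if_pos hlen, pvFold_tail]
      simp
    · rw [if_neg hlen]
      have hkf : pvKeepFirst lines = lines := by
        apply pvKeepFirst_single
        rw [← pvIdxs_length lines 0]; omega
      simp [hkf]
      exact (pvJoin_split content).symm
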